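-- pv_equiv track=rewrite | github.com/h-ram/freecodecamp | Daily Challanges/2026-02-February/2026-02-21.py | score_curling
-- ===== SOURCE A (Python) =====
-- def score_curling(house):
--     red = []
--     yellow = []
--
--     for i in range(5):
--         for j in range(5):
--             if house[i][j] == 'R':
--                 red.append(max(abs(i-2), abs(j-2)))
--             elif house[i][j] == 'Y':
--                 yellow.append(max(abs(i-2), abs(j-2)))
--
--     if not red and not yellow:
--         return "No points awarded"
--
--     if not red:
--         return f"Y: {len(yellow)}"
--     if not yellow:
--         return f"R: {len(red)}"
--
--     closest_red = min(red)
--     closest_yellow = min(yellow)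
--
--     if closest_red == closest_yellow:
--         return "No points awarded"
--
--     if closest_red < closest_yellow:
--         points = sum(1 for r in red if r < closest_yellow)
--         return f"R: {points}"
--     else:
--         points = sum(1 for r in yellow if r < closest_red)
--         return f"Y: {points}"
-- ===== SOURCE B (Python) =====
-- def score_curling(house):
--     stones = [(max(abs(i - 2), abs(j - 2)), house[i][j])
--               for i in range(5) for j in range(5)
--               if house[i][j] in ('R', 'Y')]
--     stones.sort(key=lambda s: s[0])
--     if not stones:
--         return "No points awarded"
--     d0, winner = stones[0]
--     opp = None
--     for d, c in stones:
--         if c != winner: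
--             opp = d
--             break
--     if opp is None:
--         return f"{winner}: {len(stones)}"
--     if opp == d0:
--         return "No points awarded"
--     points = 0
--     for d, _ in stones:
--         if d >= opp:
--             break
--         points += 1
--     return f"{winner}: {points}"
-- ===== Notes on version B (the rewrite author's own statement) =====
-- stated objective: alternative
-- what changed: B replaces A's two per-colour distance lists with min() and a filtered count by a single list of (chebyshev-distance, colour) stones sorted by distance, reading winner, tie and score off the sorted list (head = winner, first other-colour element = opponent minimum, score = length of the strict prefix closer than it).
import Mathlib
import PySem

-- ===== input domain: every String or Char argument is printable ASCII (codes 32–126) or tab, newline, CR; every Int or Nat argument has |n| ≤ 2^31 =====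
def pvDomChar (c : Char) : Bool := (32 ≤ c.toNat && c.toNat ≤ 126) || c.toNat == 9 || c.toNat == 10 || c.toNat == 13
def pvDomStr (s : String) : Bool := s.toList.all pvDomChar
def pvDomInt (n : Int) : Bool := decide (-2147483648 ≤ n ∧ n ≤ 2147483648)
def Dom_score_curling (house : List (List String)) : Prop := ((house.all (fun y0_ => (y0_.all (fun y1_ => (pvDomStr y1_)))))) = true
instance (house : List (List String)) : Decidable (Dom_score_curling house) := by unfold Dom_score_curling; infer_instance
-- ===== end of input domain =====

-- B collects all stones as (chebyshev-distance, colour) pairs, sorts them by distance and reads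
-- winner, tie and score off the sorted list instead of A's per-colour lists with min() and a
-- filtered count; objective: alternative, not faster.

-- ===== PORT A =====
def score_curling (house : List (List String)) : String :=
  let st := (PySem.List.pyRange 0 5 1).foldl (fun st i =>
    (PySem.List.pyRange 0 5 1).foldl (fun st j =>
      let cell := PySem.List.pyGetD (PySem.List.pyGetD house i []) j ""
      if cell = "R" then (st.1 ++ [max |i - 2| |j - 2|], st.2)
      else if cell = "Y" then (st.1, st.2 ++ [max |i - 2| |j - 2|])
      else st) st) (([], []) : List Int × List Int)
  let red := st.1
  let yellow := st.2
  if red.isEmpty && yellow.isEmpty then "No points awarded"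
  else if red.isEmpty then "Y: " ++ PySem.Int.toStr (yellow.length : Int)
  else if yellow.isEmpty then "R: " ++ PySem.Int.toStr (red.length : Int)
  else
    -- min(red) / min(yellow): both lists are nonempty on this branch, so Python's min cannot raise
    let closest_red := (PySem.List.min? red (fun x => x)).getD 0
    let closest_yellow := (PySem.List.min? yellow (fun x => x)).getD 0
    if closest_red = closest_yellow then "No points awarded"
    else if closest_red < closest_yellow then
      "R: " ++ PySem.Int.toStr (red.foldl (fun s r => if r < closest_yellow then s + 1 else s) 0)
    else
      "Y: " ++ PySem.Int.toStr (yellow.foldl (fun s r => if r < closest_red then s + 1 else s) 0)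

-- ===== PORT B =====
def score_curling_alt (house : List (List String)) : String :=
  let stones := (PySem.List.pyRange 0 5 1).foldl (fun acc i =>
    (PySem.List.pyRange 0 5 1).foldl (fun acc j =>
      let cell := PySem.List.pyGetD (PySem.List.pyGetD house i []) j ""
      if cell = "R" ∨ cell = "Y" then acc ++ [(max |i - 2| |j - 2|, cell)] else acc) acc)
    ([] : List (Int × String))
  let s := PySem.List.sorted stones (fun p => p.1) false
  match s with
  | [] => "No points awarded"
  | (d0, winner) :: _ =>
    -- 'for d, c in stones: if c != winner: opp = d; break' = first element of another colour
    match s.find? (fun p => decide (p.2 ≠ winner)) with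
    | none => winner ++ ": " ++ PySem.Int.toStr (s.length : Int)
    | some q =>
      if q.1 = d0 then "No points awarded"
      else
        -- 'for d, _ in stones: if d >= opp: break; points += 1' = length of the strict prefix
        winner ++ ": " ++ PySem.Int.toStr ((s.takeWhile (fun p => decide (p.1 < q.1))).length : Int)

-- ===== PRECONDITION & SPEC =====
-- Pre_ excludes exactly the inputs where Python A raises IndexError: a house with fewer than
-- 5 rows, or one of the first 5 rows with fewer than 5 entries.
def Pre_score_curling (house : List (List String)) : Prop :=
  5 ≤ house.length ∧ ∀ r ∈ house.take 5, 5 ≤ r.length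
instance (house : List (List String)) : Decidable (Pre_score_curling house) := by
  unfold Pre_score_curling; infer_instance

def pvWitness_score_curling : List (List String) :=
  [["", "", "", "", ""], ["", "R", "", "", ""], ["", "", "Y", "", ""],
   ["", "", "", "", ""], ["", "", "", "", ""]]

def Spec_score_curling (house : List (List String)) (out : String) : Prop := out = score_curling_alt house
instance (house : List (List String)) (out : String) : Decidable (Spec_score_curling house out) := by
  unfold Spec_score_curling; infer_instance

-- ===== CLAIM (what is proved, stated in full; the proofs are below) =====
def Claim_equal_score_curling : Prop := ∀ (house : List (List String)), Dom_score_curling house → Pre_score_curling house → Spec_score_curling house (score_curling house)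

-- ===== LEMMAS AND PROOFS =====

-- A's two per-colour distance lists, read off B's stone list
def pvReds (l : List (Int × String)) : List Int := (l.filter (fun p => p.2 == "R")).map Prod.fst
def pvYels (l : List (Int × String)) : List Int := (l.filter (fun p => p.2 == "Y")).map Prod.fst
def pvOkc (l : List (Int × String)) : Prop := ∀ p ∈ l, p.2 = "R" ∨ p.2 = "Y"

lemma pvReds_append_R (l : List (Int × String)) (d : Int) :
    pvReds (l ++ [(d, "R")]) = pvReds l ++ [d] := by simp [pvReds]
lemma pvReds_append_Y (l : List (Int × String)) (d : Int) :
    pvReds (l ++ [(d, "Y")]) = pvReds l := by simp [pvReds]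
lemma pvYels_append_R (l : List (Int × String)) (d : Int) :
    pvYels (l ++ [(d, "R")]) = pvYels l := by simp [pvYels]
lemma pvYels_append_Y (l : List (Int × String)) (d : Int) :
    pvYels (l ++ [(d, "Y")]) = pvYels l ++ [d] := by simp [pvYels]
lemma pvOkc_append (l : List (Int × String)) (d : Int) (c : String) (hc : c = "R" ∨ c = "Y")
    (h : pvOkc l) : pvOkc (l ++ [(d, c)]) := by
  intro p hp
  rcases List.mem_append.mp hp with hp | hp
  · exact h p hp
  · simp at hp; subst hp; exact hc

-- the inner (over j) fold relation between A's state and B's state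
lemma pv_inner_rel (house : List (List String)) (i : Int) (js : List Int)
    (st : List Int × List Int) (l : List (Int × String))
    (h1 : st.1 = pvReds l) (h2 : st.2 = pvYels l) (h3 : pvOkc l) :
    (js.foldl (fun st j =>
      let cell := PySem.List.pyGetD (PySem.List.pyGetD house i []) j ""
      if cell = "R" then (st.1 ++ [max |i - 2| |j - 2|], st.2)
      else if cell = "Y" then (st.1, st.2 ++ [max |i - 2| |j - 2|])
      else st) st).1 = pvReds (js.foldl (fun acc j =>
      let cell := PySem.List.pyGetD (PySem.List.pyGetD house i []) j ""
      if cell = "R" ∨ cell = "Y" then acc ++ [(max |i - 2| |j - 2|, cell)] else acc) l) ∧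
    (js.foldl (fun st j =>
      let cell := PySem.List.pyGetD (PySem.List.pyGetD house i []) j ""
      if cell = "R" then (st.1 ++ [max |i - 2| |j - 2|], st.2)
      else if cell = "Y" then (st.1, st.2 ++ [max |i - 2| |j - 2|])
      else st) st).2 = pvYels (js.foldl (fun acc j =>
      let cell := PySem.List.pyGetD (PySem.List.pyGetD house i []) j ""
      if cell = "R" ∨ cell = "Y" then acc ++ [(max |i - 2| |j - 2|, cell)] else acc) l) ∧
    pvOkc (js.foldl (fun acc j =>
      let cell := PySem.List.pyGetD (PySem.List.pyGetD house i []) j ""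
      if cell = "R" ∨ cell = "Y" then acc ++ [(max |i - 2| |j - 2|, cell)] else acc) l) := by
  induction js generalizing st l with
  | nil => exact ⟨h1, h2, h3⟩
  | cons j t ih =>
    simp only [List.foldl_cons]
    by_cases hR : PySem.List.pyGetD (PySem.List.pyGetD house i []) j "" = "R"
    · rw [if_pos (Or.inl hR), if_pos hR, hR]
      exact ih _ _ (by simp [pvReds_append_R, h1]) (by simp [pvYels_append_R, h2])
        (pvOkc_append _ _ _ (Or.inl rfl) h3)
    · by_cases hY : PySem.List.pyGetD (PySem.List.pyGetD house i []) j "" = "Y"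
      · rw [if_pos (Or.inr hY), if_neg hR, if_pos hY, hY]
        exact ih _ _ (by simp [pvReds_append_Y, h1]) (by simp [pvYels_append_Y, h2])
          (pvOkc_append _ _ _ (Or.inr rfl) h3)
      · rw [if_neg hR, if_neg hY, if_neg (by tauto)]
        exact ih _ _ h1 h2 h3

-- the outer (over i) fold relation
lemma pv_outer_rel (house : List (List String)) (is : List Int)
    (st : List Int × List Int) (l : List (Int × String))
    (h1 : st.1 = pvReds l) (h2 : st.2 = pvYels l) (h3 : pvOkc l) :
    (is.foldl (fun st i => (PySem.List.pyRange 0 5 1).foldl (fun st j =>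
      let cell := PySem.List.pyGetD (PySem.List.pyGetD house i []) j ""
      if cell = "R" then (st.1 ++ [max |i - 2| |j - 2|], st.2)
      else if cell = "Y" then (st.1, st.2 ++ [max |i - 2| |j - 2|])
      else st) st) st).1 = pvReds (is.foldl (fun acc i => (PySem.List.pyRange 0 5 1).foldl (fun acc j =>
      let cell := PySem.List.pyGetD (PySem.List.pyGetD house i []) j ""
      if cell = "R" ∨ cell = "Y" then acc ++ [(max |i - 2| |j - 2|, cell)] else acc) acc) l) ∧
    (is.foldl (fun st i => (PySem.List.pyRange 0 5 1).foldl (fun st j =>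
      let cell := PySem.List.pyGetD (PySem.List.pyGetD house i []) j ""
      if cell = "R" then (st.1 ++ [max |i - 2| |j - 2|], st.2)
      else if cell = "Y" then (st.1, st.2 ++ [max |i - 2| |j - 2|])
      else st) st) st).2 = pvYels (is.foldl (fun acc i => (PySem.List.pyRange 0 5 1).foldl (fun acc j =>
      let cell := PySem.List.pyGetD (PySem.List.pyGetD house i []) j ""
      if cell = "R" ∨ cell = "Y" then acc ++ [(max |i - 2| |j - 2|, cell)] else acc) acc) l) ∧
    pvOkc (is.foldl (fun acc i => (PySem.List.pyRange 0 5 1).foldl (fun acc j =>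
      let cell := PySem.List.pyGetD (PySem.List.pyGetD house i []) j ""
      if cell = "R" ∨ cell = "Y" then acc ++ [(max |i - 2| |j - 2|, cell)] else acc) acc) l) := by
  induction is generalizing st l with
  | nil => exact ⟨h1, h2, h3⟩
  | cons i t ih =>
    simp only [List.foldl_cons]
    obtain ⟨g1, g2, g3⟩ := pv_inner_rel house i (PySem.List.pyRange 0 5 1) st l h1 h2 h3
    exact ih _ _ g1 g2 g3

-- on a list sorted by fst, the strict prefix below t is exactly the elements below t
lemma pv_takeWhile_countP (s : List (Int × String)) (t : Int)
    (hp : s.Pairwise (fun a b => a.1 ≤ b.1)) :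
    (s.takeWhile (fun p => decide (p.1 < t))).length = s.countP (fun p => decide (p.1 < t)) := by
  induction s with
  | nil => simp
  | cons x xs ih =>
    rw [List.pairwise_cons] at hp
    by_cases hx : x.1 < t
    · simp [List.takeWhile_cons, List.countP_cons, hx, ih hp.2]
    · simp [List.takeWhile_cons, List.countP_cons, hx]
      symm
      rw [List.countP_eq_zero]
      intro p hps
      have := hp.1 p hps
      simp; omega

-- min over a per-colour list, characterised by membership + lower bound
lemma pv_min_eq (xs : List Int) (m : Int) (hm : m ∈ xs) (hlb : ∀ y ∈ xs, m ≤ y) :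
    (PySem.List.min? xs (fun x => x)).getD 0 = m := by
  obtain ⟨v, hv⟩ : ∃ v, PySem.List.min? xs (fun x => x) = some v := by
    cases hvo : PySem.List.min? xs (fun x => x) with
    | none => rw [PySem.List.min?_eq_none_iff] at hvo; subst hvo; simp at hm
    | some v => exact ⟨v, rfl⟩
  have hvm := PySem.List.min?_mem hv
  have hvmin := PySem.List.min?_isMin hv
  rw [hv, Option.getD_some]
  exact le_antisymm (hvmin m hm) (hlb v hvm)

lemma pv_mem_reds (l : List (Int × String)) (d : Int) :
    d ∈ pvReds l ↔ ∃ p ∈ l, p.2 = "R" ∧ p.1 = d := by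
  simp [pvReds]


lemma pv_mem_yels (l : List (Int × String)) (d : Int) :
    d ∈ pvYels l ↔ ∃ p ∈ l, p.2 = "Y" ∧ p.1 = d := by
  simp [pvYels]


-- A's counting loop over a per-colour list, as a countP over the stone list
lemma pv_count_red (l : List (Int × String)) (t : Int) :
    (pvReds l).foldl (fun s r => if r < t then s + 1 else s) (0 : Int) =
      (l.countP (fun p => decide (p.1 < t) && (p.2 == "R")) : Int) := by
  rw [PySem.List.foldl_ite_add_one]
  simp only [zero_add, pvReds, List.countP_map, List.countP_filter]
  rfl

lemma pv_count_yel (l : List (Int × String)) (t : Int) :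
    (pvYels l).foldl (fun s r => if r < t then s + 1 else s) (0 : Int) =
      (l.countP (fun p => decide (p.1 < t) && (p.2 == "Y")) : Int) := by
  rw [PySem.List.foldl_ite_add_one]
  simp only [zero_add, pvYels, List.countP_map, List.countP_filter]
  rfl

-- the main tail lemma: A's decision from (pvReds l, pvYels l) equals B's from the sorted stones
lemma pv_tail (l : List (Int × String)) (hok : pvOkc l) :
    (let red := pvReds l
     let yellow := pvYels l
     if red.isEmpty && yellow.isEmpty then "No points awarded"
     else if red.isEmpty then "Y: " ++ PySem.Int.toStr (yellow.length : Int)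
     else if yellow.isEmpty then "R: " ++ PySem.Int.toStr (red.length : Int)
     else
       let closest_red := (PySem.List.min? red (fun x => x)).getD 0
       let closest_yellow := (PySem.List.min? yellow (fun x => x)).getD 0
       if closest_red = closest_yellow then "No points awarded"
       else if closest_red < closest_yellow then
         "R: " ++ PySem.Int.toStr (red.foldl (fun s r => if r < closest_yellow then s + 1 else s) 0)
       else
         "Y: " ++ PySem.Int.toStr (yellow.foldl (fun s r => if r < closest_red then s + 1 else s) 0)) =
    (let s := PySem.List.sorted l (fun p => p.1) false
     match s with
     | [] => "No points awarded"
     | (d0, winner) :: _ =>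
       match s.find? (fun p => decide (p.2 ≠ winner)) with
       | none => winner ++ ": " ++ PySem.Int.toStr (s.length : Int)
       | some q =>
         if q.1 = d0 then "No points awarded"
         else
           winner ++ ": " ++ PySem.Int.toStr ((s.takeWhile (fun p => decide (p.1 < q.1))).length : Int)) := by
  have hperm : (PySem.List.sorted l (fun p => p.1) false).Perm l := PySem.List.sorted_perm ..
  have hpair : (PySem.List.sorted l (fun p => p.1) false).Pairwise (fun a b => a.1 ≤ b.1) :=
    PySem.List.sorted_pairwise ..
  cases hs : PySem.List.sorted l (fun p => p.1) false with
  | nil =>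
    have hl : l = [] := (PySem.List.sorted_eq_nil_iff ..).mp hs
    subst hl
    simp [pvReds, pvYels, hs]
  | cons hd tl =>
    obtain ⟨d0, w⟩ := hd
    have hs' := hs
    rw [hs] at hperm hpair
    have hmemhead : (d0, w) ∈ l := hperm.mem_iff.mp (by simp)
    have hmin : ∀ y ∈ l, d0 ≤ y.1 := by
      intro y hy
      exact PySem.List.key_head_sorted_le l (fun p : Int × String => p.1) hs' y hy
    have hw : w = "R" ∨ w = "Y" := hok _ hmemhead
    have hlne : l ≠ [] := by intro h; subst h; simpa using hperm.length_eq
    simp only [hs]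
    cases hf : ((d0, w) :: tl).find? (fun p => decide (p.2 ≠ w)) with
    | none =>
      have hall : ∀ p ∈ l, p.2 = w := by
        intro p hp
        have hps : p ∈ (d0, w) :: tl := hperm.mem_iff.mpr hp
        have := List.find?_eq_none.mp hf p hps
        simpa using this
      rcases hw with hw | hw
      · -- all stones red
        subst hw
        have hyel : pvYels l = [] := by
          simp only [pvYels, List.map_eq_nil_iff, List.filter_eq_nil_iff]
          intro p hp; have := hall p hp; simp [this]
        have hred : pvReds l = l.map Prod.fst := by
          simp only [pvReds]
          congr 1
          apply List.filter_eq_self.mpr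
          intro p hp; have := hall p hp; simp [this]
        simp only [hyel, hred]
        simp only [List.isEmpty_iff, List.map_eq_nil_iff, hlne, List.isEmpty_nil,
          Bool.and_false, Bool.false_eq_true, if_false, if_true, List.length_map]
        rw [hperm.length_eq]
        simp [hlne]
      · -- all stones yellow
        subst hw
        have hred : pvReds l = [] := by
          simp only [pvReds, List.map_eq_nil_iff, List.filter_eq_nil_iff]
          intro p hp; have := hall p hp; simp [this]
        have hyel : pvYels l = l.map Prod.fst := by
          simp only [pvYels]
          congr 1
          apply List.filter_eq_self.mpr
          intro p hp; have := hall p hp; simp [this]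
        simp only [hred, hyel]
        simp only [List.isEmpty_nil, List.isEmpty_iff, List.map_eq_nil_iff, hlne,
          Bool.true_and, if_false, if_true, List.length_map]
        rw [hperm.length_eq]
        simp [hlne]
    | some q =>
      rw [List.find?_eq_some_iff_append] at hf
      obtain ⟨hq2, as, bs, hsplit, hbefore⟩ := hf
      have hq2 : q.2 ≠ w := by simpa using hq2
      have hbefore : ∀ a ∈ as, a.2 = w := by
        intro a ha; have := hbefore a ha; simpa using this
      have hqmem : q ∈ l := hperm.mem_iff.mp (by rw [hsplit]; simp)
      have hoppmin : ∀ p ∈ l, p.2 ≠ w → q.1 ≤ p.1 := by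
        intro p hp hpne
        have hps : p ∈ (d0, w) :: tl := hperm.mem_iff.mpr hp
        rw [hsplit] at hps
        rcases List.mem_append.mp hps with hps | hps
        · exact absurd (hbefore p hps) hpne
        · rcases List.mem_cons.mp hps with hps | hps
          · subst hps; exact le_refl _
          · have hsub : (q :: bs).Sublist ((d0, w) :: tl) := by
              rw [hsplit]; exact List.sublist_append_right ..
            have hqbs := hpair.sublist hsub
            rw [List.pairwise_cons] at hqbs
            exact hqbs.1 p hps
      have hd0q : d0 ≤ q.1 := hmin q hqmem
      have hcontra : ∀ p ∈ l, p.1 < q.1 → p.2 = w := by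
        intro p hp hlt
        by_contra hne
        exact absurd hlt (not_lt.mpr (hoppmin p hp hne))
      -- countP below q.1 over l, colour-blind = colour-restricted to w
      have hcnt : ∀ cw : String, cw = w →
          l.countP (fun p => decide (p.1 < q.1) && (p.2 == cw)) =
            ((d0, w) :: tl).countP (fun p => decide (p.1 < q.1)) := by
        intro cw hcw; subst hcw
        rw [hperm.countP_eq]
        apply List.countP_congr
        intro p hp
        constructor
        · intro h; simp at h ⊢; exact h.1
        · intro h; simp at h ⊢; exact ⟨h, hcontra p hp h⟩
      rcases hw with hw | hw
      · -- head red, so q yellow, red closest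
        subst hw
        have hqY : q.2 = "Y" := by
          rcases hok q hqmem with h | h
          · exact absurd h hq2
          · exact h
        have hredmem : d0 ∈ pvReds l := (pv_mem_reds l d0).mpr ⟨(d0, "R"), hmemhead, rfl, rfl⟩
        have hyelmem : q.1 ∈ pvYels l := (pv_mem_yels l q.1).mpr ⟨q, hqmem, hqY, rfl⟩
        have hredne : pvReds l ≠ [] := fun h => by rw [h] at hredmem; simp at hredmem
        have hyelne : pvYels l ≠ [] := fun h => by rw [h] at hyelmem; simp at hyelmem
        have hminr : (PySem.List.min? (pvReds l) (fun x => x)).getD 0 = d0 := by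
          apply pv_min_eq _ _ hredmem
          intro y hy
          obtain ⟨p, hp, _, hp1⟩ := (pv_mem_reds l y).mp hy
          rw [← hp1]; exact hmin p hp
        have hminy : (PySem.List.min? (pvYels l) (fun x => x)).getD 0 = q.1 := by
          apply pv_min_eq _ _ hyelmem
          intro y hy
          obtain ⟨p, hp, hp2, hp1⟩ := (pv_mem_yels l y).mp hy
          rw [← hp1]; exact hoppmin p hp (by rw [hp2]; simp)
        simp only [List.isEmpty_iff, hredne, hyelne, Bool.and_self, if_neg hredne,
          if_neg hyelne, hminr, hminy]
        simp only [hredne, hyelne, decide_false, Bool.false_and, Bool.false_eq_true, if_false]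
        by_cases htie : q.1 = d0
        · simp [htie]
        · have hlt : d0 < q.1 := lt_of_le_of_ne hd0q (fun h => htie h.symm)
          rw [if_neg (show ¬ (d0 = q.1) from fun h => htie h.symm), if_pos hlt, if_neg htie]
          rw [pv_count_red l q.1, hcnt "R" rfl,
            pv_takeWhile_countP _ _ hpair]
          rw [if_neg (show ¬ ((pvReds l).isEmpty && (pvYels l).isEmpty) = true by
            simp [List.isEmpty_iff, hredne, hyelne])]
          rfl
      · -- head yellow, so q red, yellow closest
        subst hw
        have hqR : q.2 = "R" := by
          rcases hok q hqmem with h | h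
          · exact h
          · exact absurd h hq2
        have hyelmem : d0 ∈ pvYels l := (pv_mem_yels l d0).mpr ⟨(d0, "Y"), hmemhead, rfl, rfl⟩
        have hredmem : q.1 ∈ pvReds l := (pv_mem_reds l q.1).mpr ⟨q, hqmem, hqR, rfl⟩
        have hredne : pvReds l ≠ [] := fun h => by rw [h] at hredmem; simp at hredmem
        have hyelne : pvYels l ≠ [] := fun h => by rw [h] at hyelmem; simp at hyelmem
        have hminy : (PySem.List.min? (pvYels l) (fun x => x)).getD 0 = d0 := by
          apply pv_min_eq _ _ hyelmem
          intro y hy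
          obtain ⟨p, hp, _, hp1⟩ := (pv_mem_yels l y).mp hy
          rw [← hp1]; exact hmin p hp
        have hminr : (PySem.List.min? (pvReds l) (fun x => x)).getD 0 = q.1 := by
          apply pv_min_eq _ _ hredmem
          intro y hy
          obtain ⟨p, hp, hp2, hp1⟩ := (pv_mem_reds l y).mp hy
          rw [← hp1]; exact hoppmin p hp (by rw [hp2]; simp)
        simp only [List.isEmpty_iff, hredne, hyelne, Bool.and_self, if_neg hredne,
          if_neg hyelne, hminr, hminy]
        simp only [hredne, hyelne, decide_false, Bool.false_and, Bool.false_eq_true, if_false]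
        by_cases htie : q.1 = d0
        · simp [htie]
        · have hlt : d0 < q.1 := lt_of_le_of_ne hd0q (fun h => htie h.symm)
          rw [if_neg htie, if_neg (not_lt.mpr (le_of_lt hlt)), if_neg htie]
          rw [pv_count_yel l q.1, hcnt "Y" rfl,
            pv_takeWhile_countP _ _ hpair]
          rw [if_neg (show ¬ ((pvReds l).isEmpty && (pvYels l).isEmpty) = true by
            simp [List.isEmpty_iff, hredne, hyelne])]
          rfl

-- ===== VERDICT (by name: the statement is the Claim_ definition above) =====
theorem score_curling_spec : Claim_equal_score_curling := by
  intro house _ _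
  unfold Spec_score_curling
  show score_curling house = score_curling_alt house
  obtain ⟨h1, h2, h3⟩ := pv_outer_rel house (PySem.List.pyRange 0 5 1)
    ([], []) [] (by simp [pvReds]) (by simp [pvYels]) (by intro p hp; simp at hp)
  unfold score_curling score_curling_alt
  simp only [h1, h2]
  exact pv_tail _ h3
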